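-- pv_equiv track=rewrite | github.com/FL1NEE/mitmproxy_server | mitmservice.py | mask_upstream_auth_in_cmd
-- ===== SOURCE A (Python) =====
-- from typing import Dict, Optional, Tuple, List
--
-- def mask_upstream_auth_in_cmd(cmd_list: List[str]) -> str:
--     """
--     Возвращает строковое представление команды, где значение после --upstream-auth замаскировано.
--     Также пытается маскировать user:pass@host внутри одного аргумента.
--     """
--     safe: List[str] = []
--     skip_next_mask: bool = False
--     for part in cmd_list:
--         if skip_next_mask:
--             safe.append("******")
--             skip_next_mask = False
--             continue
--         if part == "--upstream-auth":
--             safe.append(part)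
--             skip_next_mask = True
--             continue
--         # обработка http://user:pass@host:port
--         if part.startswith("http") and "@" in part and ":" in part:
--             try:
--                 scheme, rest = part.split("://", 1)
--                 if "@" in rest:
--                     userinfo, host = rest.rsplit("@", 1)
--                     if ":" in userinfo:
--                         user, pwd = userinfo.split(":", 1)
--                         safe.append(f"{scheme}://{user}:******@{host}")
--                         continue
--             except Exception:
--                 pass
--         safe.append(part)
--     return " ".join(safe)
-- ===== SOURCE B (Python) =====
-- from typing import List
--
--
-- def _mask_url(part: str) -> str:
--     """Mask the password in a http://user:pass@host argument, using the
--     idiomatic partition/rpartition decomposition instead of split/rsplit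
--     unpacking under try/except."""
--     if not part.startswith("http"):
--         return part
--     scheme, sep, rest = part.partition("://")
--     if not sep:
--         return part
--     userinfo, at, host = rest.rpartition("@")
--     if not at:
--         return part
--     user, colon, _pwd = userinfo.partition(":")
--     if not colon:
--         return part
--     return scheme + "://" + user + ":******@" + host
--
--
-- def mask_upstream_auth_in_cmd(cmd_list: List[str]) -> str:
--     # Staged passes: first compute the set of positions whose value must be
--     # hidden (the position right after an unconsumed --upstream-auth), then
--     # render every position independently from that set.
--     n = len(cmd_list)
--     masked = set()
--     for i, part in enumerate(cmd_list):
--         if part == "--upstream-auth" and i not in masked and i + 1 < n: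
--             masked.add(i + 1)
--     out: List[str] = []
--     for i, part in enumerate(cmd_list):
--         if i in masked:
--             out.append("******")
--         elif part == "--upstream-auth":
--             out.append(part)
--         else:
--             out.append(_mask_url(part))
--     return " ".join(out)
-- ===== Notes on version B (the rewrite author's own statement) =====
-- stated objective: alternative
-- what changed: Replaces A's single pass with carried mask-next-iteration boolean state by two staged passes -- pass 1 computes the set of positions to hide, pass 2 renders every position independently from that set -- and masks URL credentials via partition/rpartition instead of try/except split/rsplit tuple unpacking.
import Mathlib
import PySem

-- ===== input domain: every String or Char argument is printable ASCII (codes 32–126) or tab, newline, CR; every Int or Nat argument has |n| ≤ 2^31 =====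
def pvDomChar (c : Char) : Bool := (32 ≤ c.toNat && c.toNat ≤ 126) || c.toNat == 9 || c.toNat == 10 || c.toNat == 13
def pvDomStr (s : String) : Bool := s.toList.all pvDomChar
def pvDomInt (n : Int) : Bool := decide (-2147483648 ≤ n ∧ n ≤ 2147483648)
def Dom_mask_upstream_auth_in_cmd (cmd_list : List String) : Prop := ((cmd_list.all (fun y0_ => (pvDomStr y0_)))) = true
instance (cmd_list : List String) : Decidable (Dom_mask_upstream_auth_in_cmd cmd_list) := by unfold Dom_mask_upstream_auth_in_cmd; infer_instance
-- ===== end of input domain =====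

-- B replaces A's one-pass loop with carried mask-next-flag state by two staged
-- passes (first compute the set of positions to hide, then render each position
-- from that set) and masks URLs via partition/rpartition instead of
-- try/except split/rsplit unpacking (objective: alternative; return value only).

-- ===== PORT A =====
-- the masking logic inlined in A's loop body (the part after the two 'continue' branches)
def pvMaskA (part : String) : String :=
  if PySem.Str.startswith part "http" && PySem.Str.isIn "@" part && PySem.Str.isIn ":" part then
    -- scheme, rest = part.split("://", 1); ValueError (no "://") is caught → fall through to part
    match PySem.Str.splitMax? part "://" 1 with
    | some [scheme, rest] =>
        if PySem.Str.isIn "@" rest then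
          -- userinfo, host = rest.rsplit("@", 1) with '@' present: split at the LAST '@' (hand port, exact)
          let k := PySem.Str.rfind rest "@"
          let userinfo := PySem.Str.slice rest none (some k)
          let host := PySem.Str.slice rest (some (k + 1)) none
          if PySem.Str.isIn ":" userinfo then
            -- user, pwd = userinfo.split(":", 1) with ':' present: always two pieces
            match PySem.Str.splitMax? userinfo ":" 1 with
            | some [user, _pwd] =>
                -- f"{scheme}://{user}:******@{host}"  (concatenation, exact)
                PySem.Str.join "" [scheme, "://", user, ":******@", host]
            | _ => part
          else part
        else part
    | _ => part
  else part

def mask_upstream_auth_in_cmd (cmd_list : List String) : String :=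
  let st := cmd_list.foldl
    (fun (st : List String × Bool) part =>
      if st.2 then (st.1 ++ ["******"], false)
      else if part = "--upstream-auth" then (st.1 ++ [part], true)
      else (st.1 ++ [pvMaskA part], false))
    ([], false)
  PySem.Str.join " " st.1

-- ===== PORT B =====
-- hand port of str.partition(sep) for non-empty sep: split at the FIRST occurrence (exact)
def pvPartition (s sep : List Char) : List Char × List Char × List Char :=
  let k := PySem.Chars.find s sep
  if k = -1 then (s, [], [])
  else (s.take k.toNat, sep, s.drop (k.toNat + sep.length))

-- hand port of str.rpartition(sep) for non-empty sep: split at the LAST occurrence (exact)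
def pvRPartition (s sep : List Char) : List Char × List Char × List Char :=
  let k := PySem.Chars.rfind s sep
  if k = -1 then ([], [], s)
  else (s.take k.toNat, sep, s.drop (k.toNat + sep.length))

-- _mask_url from Source B (partition/rpartition based; string + is list append, exact)
def pvMaskB (part : String) : String :=
  if !(PySem.Str.startswith part "http") then part
  else
    let p1 := pvPartition part.toList "://".toList      -- scheme, sep, rest
    if p1.2.1 = [] then part
    else
      let p2 := pvRPartition p1.2.2 "@".toList          -- userinfo, at, host
      if p2.2.1 = [] then part
      else
        let p3 := pvPartition p2.1 ":".toList           -- user, colon, _pwd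
        if p3.2.1 = [] then part
        else String.ofList (p1.1 ++ "://".toList ++ p3.1 ++ ":******@".toList ++ p2.2.2)

def mask_upstream_auth_in_cmd_alt (cmd_list : List String) : String :=
  let n : Int := (cmd_list.length : Int)
  -- pass 1: the set of positions whose value must be hidden
  let masked : PySem.Set Int := (PySem.List.enumerate cmd_list).foldl
    (fun (m : PySem.Set Int) (p : Int × String) =>
      if p.2 = "--upstream-auth" ∧ PySem.Set.contains m p.1 = false ∧ p.1 + 1 < n
      then PySem.Set.add m (p.1 + 1) else m)
    PySem.Set.empty
  -- pass 2: render every position independently from that set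
  let out : List String := (PySem.List.enumerate cmd_list).foldl
    (fun (acc : List String) (p : Int × String) =>
      acc ++ [if PySem.Set.contains masked p.1 = true then "******"
              else if p.2 = "--upstream-auth" then p.2 else pvMaskB p.2])
    []
  PySem.Str.join " " out

-- ===== PRECONDITION & SPEC =====
def Spec_mask_upstream_auth_in_cmd (cmd_list : List String) (out : String) : Prop := out = mask_upstream_auth_in_cmd_alt cmd_list
instance (cmd_list : List String) (out : String) : Decidable (Spec_mask_upstream_auth_in_cmd cmd_list out) := by unfold Spec_mask_upstream_auth_in_cmd; infer_instance

-- ===== CLAIM (what is proved, stated in full; the proofs are below) =====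
def Claim_equal_mask_upstream_auth_in_cmd : Prop := ∀ (cmd_list : List String), Dom_mask_upstream_auth_in_cmd cmd_list → Spec_mask_upstream_auth_in_cmd cmd_list (mask_upstream_auth_in_cmd cmd_list)

-- ===== LEMMAS AND PROOFS =====

theorem go0 (sep : List Char) (fuel : Nat) (l cur : List Char) (acc : List (List Char)) :
    PySem.Chars.splitOnMax.go sep fuel 0 l cur acc = ((cur.reverse ++ l) :: acc).reverse := by
  cases fuel with
  | zero => simp [PySem.Chars.splitOnMax.go]
  | succ f => cases l with
    | nil => simp [PySem.Chars.splitOnMax.go]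
    | cons c t => simp [PySem.Chars.splitOnMax.go]

theorem find_go_succ (sub l : List Char) (k : Nat) :
    PySem.Chars.find.go sub l (k+1) =
      if PySem.Chars.find.go sub l 0 = -1 then -1 else PySem.Chars.find.go sub l 0 + (k+1) := by
  induction l generalizing k with
  | nil => simp [PySem.Chars.find.go]; split; simp; simp
  | cons c t ih =>
      by_cases hp : sub.isPrefixOf (c :: t)
      · simp [PySem.Chars.find.go, hp]
      · simp only [PySem.Chars.find.go, hp, Bool.false_eq_true, if_false]
        rw [show k+1+1 = (k+1)+1 from rfl, ih (k+1), ih 0]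
        have ha : -1 ≤ PySem.Chars.find.go sub t 0 := PySem.Chars.neg_one_le_find t sub
        split
        · push_cast
        · push_cast; omega

theorem go1 (sep : List Char) (hsep : sep ≠ []) :
    ∀ (l : List Char) (fuel : Nat) (cur : List Char) (acc : List (List Char)), l.length < fuel →
    PySem.Chars.splitOnMax.go sep fuel 1 l cur acc =
      if PySem.Chars.find l sep = -1 then acc.reverse ++ [cur.reverse ++ l]
      else acc.reverse ++ [cur.reverse ++ l.take (PySem.Chars.find l sep).toNat,
                           l.drop ((PySem.Chars.find l sep).toNat + sep.length)] := by
  intro l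
  induction l with
  | nil =>
      intro fuel cur acc hf
      cases fuel with
      | zero => omega
      | succ f =>
          simp [PySem.Chars.splitOnMax.go, PySem.Chars.find, PySem.Chars.find.go,
                List.isEmpty_iff, hsep]
  | cons c t ih =>
      intro fuel cur acc hf
      cases fuel with
      | zero => omega
      | succ f =>
          by_cases hp : sep.isPrefixOf (c :: t)
          · have hfind : PySem.Chars.find (c :: t) sep = 0 := by
              simp [PySem.Chars.find, PySem.Chars.find.go, hp]
            simp only [PySem.Chars.splitOnMax.go, hp, if_true, one_ne_zero, hfind]
            rw [go0]
            simp
          · have hfind : PySem.Chars.find (c :: t) sep =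
                if PySem.Chars.find t sep = -1 then -1 else PySem.Chars.find t sep + 1 := by
              show PySem.Chars.find.go sep (c :: t) 0 = _
              simp only [PySem.Chars.find.go, hp, Bool.false_eq_true, if_false]
              exact find_go_succ sep t 0
            have hlt : t.length < f := by simp at hf; omega
            simp only [PySem.Chars.splitOnMax.go, hp, if_false, one_ne_zero]
            rw [ih f (c :: cur) acc hlt, hfind]
            have ha : -1 ≤ PySem.Chars.find t sep := PySem.Chars.neg_one_le_find t sep
            by_cases h0 : PySem.Chars.find t sep = -1
            · simp [h0]
            · have h0' : 0 ≤ PySem.Chars.find t sep := by omega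
              have hne : PySem.Chars.find t sep + 1 ≠ -1 := by omega
              simp only [h0, hne, if_false, Bool.false_eq_true]
              have htn : (PySem.Chars.find t sep + 1).toNat = (PySem.Chars.find t sep).toNat + 1 := by omega
              rw [htn]
              rw [show (PySem.Chars.find t sep).toNat + 1 + sep.length
                    = ((PySem.Chars.find t sep).toNat + sep.length) + 1 from by omega]
              simp [List.take_succ_cons, List.drop_succ_cons]

theorem splitMax1 (s sep : List Char) (hsep : sep ≠ []) :
    PySem.Chars.splitMax? s sep 1 = some
      (if PySem.Chars.find s sep = -1 then [s]
       else [s.take (PySem.Chars.find s sep).toNat,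
             s.drop ((PySem.Chars.find s sep).toNat + sep.length)]) := by
  unfold PySem.Chars.splitMax? PySem.Chars.splitOnMax
  rw [if_neg (by simp [List.isEmpty_iff, hsep]), if_neg (by omega)]
  rw [show Int.toNat 1 = 1 from rfl]
  rw [go1 sep hsep s (s.length + 1) [] [] (by omega)]
  split <;> simp

theorem rfind_go_neg_iff (s sub : List Char) (j : Nat) :
    PySem.Chars.rfind.go s sub j = -1 ↔ ∀ i : Nat, i ≤ j → ¬ sub <+: s.drop i := by
  induction j with
  | zero =>
      simp only [PySem.Chars.rfind.go]
      by_cases hp : sub.isPrefixOf s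
      · rw [if_pos hp]
        constructor
        · intro h; exact absurd h (by decide)
        · intro h; exact absurd (by simpa using hp) (by simpa using h 0 le_rfl)
      · rw [if_neg (by simpa using hp)]
        constructor
        · intro _ i hi
          have hi0 : i = 0 := Nat.le_zero.mp hi
          subst hi0
          simpa using hp
        · intro _; rfl
  | succ j ih =>
      simp only [PySem.Chars.rfind.go]
      by_cases hp : sub.isPrefixOf (s.drop (j+1))
      · rw [if_pos hp]
        constructor
        · intro h; omega
        · intro h; exact absurd (by simpa using hp) (h (j+1) le_rfl)
      · rw [if_neg (by simpa using hp)]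
        rw [ih]
        constructor
        · intro h i hi
          by_cases hij : i = j+1
          · subst hij; simpa using hp
          · exact h i (by omega)
        · intro h i hi; exact h i (by omega)

theorem rfind_go_spec (s sub : List Char) (j : Nat)
    (h : PySem.Chars.rfind.go s sub j ≠ -1) :
    0 ≤ PySem.Chars.rfind.go s sub j ∧ PySem.Chars.rfind.go s sub j ≤ (j : Int) ∧
      sub <+: s.drop (PySem.Chars.rfind.go s sub j).toNat := by
  induction j with
  | zero =>
      simp only [PySem.Chars.rfind.go] at *
      by_cases hp : sub.isPrefixOf s
      · rw [if_pos hp] at *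
        exact ⟨le_rfl, le_rfl, by simpa using hp⟩
      · rw [if_neg (by simpa using hp)] at h
        exact absurd rfl h
  | succ j ih =>
      simp only [PySem.Chars.rfind.go] at *
      by_cases hp : sub.isPrefixOf (s.drop (j+1))
      · rw [if_pos hp] at *
        refine ⟨by positivity, le_rfl, ?_⟩
        simpa using hp
      · rw [if_neg (by simpa using hp)] at *
        have := ih h
        exact ⟨this.1, by omega, this.2.2⟩

theorem rfind_neg_iff (s sub : List Char) :
    PySem.Chars.rfind s sub = -1 ↔ ¬ sub <:+: s := by
  unfold PySem.Chars.rfind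
  rw [rfind_go_neg_iff]
  constructor
  · intro h hinf
    have hex : ∃ j, sub <+: s.drop j :=
      (PySem.Chars.exists_prefix_drop_iff_isIn sub s).mpr
        ((PySem.Chars.isIn_iff_infix sub s).mpr hinf)
    obtain ⟨j, hj⟩ := hex
    by_cases hle : j ≤ s.length
    · exact h j hle hj
    · have : s.drop j = [] := List.drop_eq_nil_of_le (by omega)
      rw [this] at hj
      have : sub = [] := List.prefix_nil.mp hj
      subst this
      exact h 0 (by omega) (by simp)
  · intro h i _ hpre
    exact h ((PySem.Chars.isIn_iff_infix sub s).mp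
      ((PySem.Chars.exists_prefix_drop_iff_isIn sub s).mp ⟨i, hpre⟩))

theorem rfind_spec (s sub : List Char) (h : PySem.Chars.rfind s sub ≠ -1) :
    0 ≤ PySem.Chars.rfind s sub ∧ PySem.Chars.rfind s sub ≤ (s.length : Int) ∧
      sub <+: s.drop (PySem.Chars.rfind s sub).toNat := by
  exact rfind_go_spec s sub s.length h

theorem join_nil_flatten (ls : List (List Char)) : PySem.Chars.join [] ls = ls.flatten := by
  simp [PySem.Chars.join, List.intercalate]
  induction ls with
  | nil => rfl
  | cons a t ih => cases t <;> simp_all [List.intersperse]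

theorem str_ext {a b : String} (h : a.toList = b.toList) : a = b := by
  have h2 := congrArg String.ofList h
  rwa [String.ofList_toList, String.ofList_toList] at h2

theorem str_splitMax1 (s sep : String) (hsep : sep.toList ≠ []) :
    PySem.Str.splitMax? s sep 1 = some
      (if PySem.Chars.find s.toList sep.toList = -1 then [s]
       else [String.ofList (s.toList.take (PySem.Chars.find s.toList sep.toList).toNat),
             String.ofList (s.toList.drop ((PySem.Chars.find s.toList sep.toList).toNat + sep.toList.length))]) := by
  simp only [PySem.Str.splitMax?, splitMax1 _ _ hsep]
  split <;> simp

theorem mask_part_eq (part : String) : pvMaskA part = pvMaskB part := by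
  unfold pvMaskA pvMaskB pvPartition pvRPartition
  by_cases hsw : PySem.Str.startswith part "http" = true
  · rw [hsw]
    simp only [Bool.not_true, Bool.false_eq_true, if_false, Bool.true_and]
    by_cases hf : PySem.Chars.find part.toList "://".toList = -1
    · -- no "://" anywhere: A's unpack raises (caught), B returns at sep = []
      rw [str_splitMax1 part "://" (by decide), if_pos hf]
      rw [show ("://".toList) = [':', '/', '/'] from rfl] at hf
      simp [hf]
    · have hneg := PySem.Chars.neg_one_le_find part.toList "://".toList
      obtain ⟨k, hkI⟩ : ∃ k : Nat, PySem.Chars.find part.toList "://".toList = (k : Int) :=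
        ⟨(PySem.Chars.find part.toList "://".toList).toNat, by omega⟩
      have hpre3 : "://".toList <+: part.toList.drop k := by
        have h := (PySem.Chars.find_spec (s := part.toList) (sub := "://".toList) (by omega)).1
        rwa [hkI, Int.toNat_natCast] at h
      obtain ⟨t, ht⟩ := hpre3
      have hdropk : part.toList.drop k = ':' :: '/' :: '/' :: part.toList.drop (k + 3) := by
        rw [← List.drop_drop (i := 3) (j := k), ← ht]
        rfl
      have hk3 : k + 3 ≤ part.toList.length := by
        have h1 := congrArg List.length ht
        have e : part.toList.length = part.length := by simp
        simp at h1
        omega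
      rw [str_splitMax1 part "://" (by decide), if_neg hf, hkI]
      simp only [Int.toNat_natCast, show ("://".toList.length) = 3 from rfl,
        if_neg (show ¬((k : Int) = -1) from by omega)]
      by_cases hr : PySem.Chars.rfind (part.toList.drop (k+3)) "@".toList = -1
      · -- no '@' after the scheme separator: both sides fall through to part
        have hnotin : PySem.Chars.isIn "@".toList (part.toList.drop (k+3)) = false :=
          (PySem.Chars.isIn_eq_false_iff _ _).mpr ((rfind_neg_iff _ _).mp hr)
        rw [hr, if_pos rfl]
        simp only [PySem.Str.isIn_eq, String.toList_ofList, hnotin, Bool.false_eq_true, if_false]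
        rw [ite_self]
        simp
      · obtain ⟨rn, hrn⟩ : ∃ rn : Nat,
            PySem.Chars.rfind (part.toList.drop (k+3)) "@".toList = (rn : Int) := by
          have h := rfind_spec _ _ hr
          exact ⟨(PySem.Chars.rfind (part.toList.drop (k+3)) "@".toList).toNat, by omega⟩
        have hspec := rfind_spec (part.toList.drop (k+3)) "@".toList hr
        rw [hrn, Int.toNat_natCast] at hspec
        have hprat : "@".toList <+: (part.toList.drop (k+3)).drop rn := hspec.2.2
        have hrlen : rn < (part.toList.drop (k+3)).length := by
          obtain ⟨u, hu⟩ := hprat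
          have hlu := congrArg List.length hu
          have e : part.toList.length = part.length := by simp
          have e2 : (List.drop (k+3) part.toList).length = part.toList.length - (k+3) := by simp
          simp at hlu
          omega
        have hrfA : PySem.Str.rfind (String.ofList (part.toList.drop (k+3))) "@" = (rn : Int) := by
          rw [PySem.Str.rfind_eq, String.toList_ofList]
          exact hrn
        rw [hrfA, hrn, if_neg (show ¬((rn : Int) = -1) from by omega),
            Int.toNat_natCast, show ("@".toList.length) = 1 from rfl]
        have huisl : (PySem.Str.slice (String.ofList (List.drop (k + 3) part.toList)) none (some (rn : Int))).toList
            = (part.toList.drop (k+3)).take rn := by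
          simp [PySem.List.slice_to_natCast]
        have hinP : PySem.Str.isIn "@" part = true := by
          rw [PySem.Str.isIn_eq]
          refine (PySem.Chars.exists_prefix_drop_iff_isIn _ _).mp ⟨k+3+rn, ?_⟩
          rw [← List.drop_drop (i := rn) (j := k+3)]
          exact hprat
        have hinPc : PySem.Str.isIn ":" part = true := by
          rw [PySem.Str.isIn_eq]
          refine (PySem.Chars.exists_prefix_drop_iff_isIn _ _).mp ⟨k, ?_⟩
          rw [hdropk]
          exact ⟨'/' :: '/' :: List.drop (k+3) part.toList, rfl⟩
        have hinR : PySem.Str.isIn "@" (String.ofList (List.drop (k + 3) part.toList)) = true := by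
          rw [PySem.Str.isIn_eq,
            show (String.ofList (List.drop (k+3) part.toList)).toList = List.drop (k+3) part.toList
              from String.toList_ofList]
          exact (PySem.Chars.exists_prefix_drop_iff_isIn _ _).mp ⟨rn, hprat⟩
        rw [hinP, hinPc, hinR]
        simp only [Bool.and_self, if_true]
        by_cases hj : PySem.Chars.find (List.take rn (List.drop (k + 3) part.toList)) ":".toList = -1
        · -- no ':' inside the userinfo
          have hui : PySem.Str.isIn ":" (PySem.Str.slice (String.ofList (List.drop (k + 3) part.toList)) none (some (rn : Int))) = false := by
            rw [PySem.Str.isIn_eq, huisl]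
            exact (PySem.Chars.isIn_eq_false_iff _ _).mpr ((PySem.Chars.find_eq_neg_one_iff _ _).mp hj)
          rw [hj, if_pos rfl, hui]
          simp only [Bool.false_eq_true, if_false]
          simp
        · obtain ⟨jn, hjn⟩ : ∃ jn : Nat,
              PySem.Chars.find (List.take rn (List.drop (k + 3) part.toList)) ":".toList = (jn : Int) := by
            have := PySem.Chars.neg_one_le_find (List.take rn (List.drop (k + 3) part.toList)) ":".toList
            exact ⟨(PySem.Chars.find (List.take rn (List.drop (k + 3) part.toList)) ":".toList).toNat, by omega⟩
          have hjspec := (PySem.Chars.find_spec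
            (s := List.take rn (List.drop (k + 3) part.toList)) (sub := ":".toList) (by omega)).1
          rw [hjn, Int.toNat_natCast] at hjspec
          have hui : PySem.Str.isIn ":" (PySem.Str.slice (String.ofList (List.drop (k + 3) part.toList)) none (some (rn : Int))) = true := by
            rw [PySem.Str.isIn_eq, huisl]
            exact (PySem.Chars.exists_prefix_drop_iff_isIn _ _).mp ⟨jn, hjspec⟩
          rw [hui, if_pos rfl]
          rw [str_splitMax1 _ ":" (by decide)]
          rw [huisl, hjn, if_neg (show ¬((jn : Int) = -1) from by omega),
              if_neg (show ¬((jn : Int) = -1) from by omega), Int.toNat_natCast,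
              show (":".toList.length) = 1 from rfl]
          apply str_ext
          simp only [PySem.Str.join, String.toList_ofList, List.map,
            show ("".toList) = [] from rfl, join_nil_flatten, List.flatten,
            PySem.Str.toList_slice, PySem.Chars.slice_eq_listSlice,
            show ((rn : Int) + 1) = ((rn+1 : Nat) : Int) from by push_cast; ring,
            PySem.List.slice_from_natCast]
          simp
  · have hsw' : PySem.Str.startswith part "http" = false := by
      revert hsw; cases PySem.Str.startswith part "http" <;> simp
    rw [hsw']
    simp

-- the spec-level chunk decomposition both loops compute
def pvChunks : List String → List String
  | [] => []
  | part :: rest =>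
    if part = "--upstream-auth" then
      match rest with
      | [] => [part]
      | _next :: rest' => part :: "******" :: pvChunks rest'
    else pvMaskB part :: pvChunks rest

theorem loopA_eq (l : List String) (acc : List String) :
    (l.foldl
      (fun (st : List String × Bool) part =>
        if st.2 then (st.1 ++ ["******"], false)
        else if part = "--upstream-auth" then (st.1 ++ [part], true)
        else (st.1 ++ [pvMaskA part], false))
      (acc, false)).1 = acc ++ pvChunks l := by
  induction l using pvChunks.induct generalizing acc with
  | case1 => simp [pvChunks]
  | case2 => simp [pvChunks, List.foldl]
  | case3 part rest' ih =>
      simp only [pvChunks, List.foldl, Bool.false_eq_true, if_false, if_true]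
      rw [ih]
      simp
  | case4 part rest h ih =>
      simp only [List.foldl, h, Bool.false_eq_true, if_false]
      rw [ih, mask_part_eq]
      conv_rhs => rw [pvChunks.eq_def]
      simp [h]

-- the masked-position set pass 1 computes
def pvMI : List String → Nat → List Int
  | [], _ => []
  | part :: rest, k =>
    if part = "--upstream-auth" then
      match rest with
      | [] => []
      | _next :: rest' => ((k+1 : Nat) : Int) :: pvMI rest' (k+2)
    else pvMI rest (k+1)

-- controlled unfolding equations for pvMI and pvChunks
theorem mi_flag_nil (k : Nat) : pvMI ["--upstream-auth"] k = [] := by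
  simp [pvMI]

theorem mi_flag_cons (next : String) (rest' : List String) (k : Nat) :
    pvMI ("--upstream-auth" :: next :: rest') k = ((k+1 : Nat) : Int) :: pvMI rest' (k+2) := by
  simp [pvMI]

theorem mi_other {part : String} (h : part ≠ "--upstream-auth") (rest : List String) (k : Nat) :
    pvMI (part :: rest) k = pvMI rest (k+1) := by
  cases rest <;> simp [pvMI, h]

theorem chunks_flag_nil : pvChunks ["--upstream-auth"] = ["--upstream-auth"] := by
  simp [pvChunks]

theorem chunks_flag_cons (next : String) (rest' : List String) :
    pvChunks ("--upstream-auth" :: next :: rest') = "--upstream-auth" :: "******" :: pvChunks rest' := by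
  simp [pvChunks]

theorem chunks_other {part : String} (h : part ≠ "--upstream-auth") (rest : List String) :
    pvChunks (part :: rest) = pvMaskB part :: pvChunks rest := by
  cases rest <;> simp [pvChunks, h]

theorem mi_gt (l : List String) (k : Nat) : ∀ j ∈ pvMI l k, (k : Int) < j := by
  induction l, k using pvMI.induct with
  | case1 _ => simp [pvMI]
  | case2 k => simp [mi_flag_nil]
  | case3 k next rest' ih =>
      intro j hj
      rw [mi_flag_cons, List.mem_cons] at hj
      rcases hj with h | h
      · subst h; push_cast; omega
      · have := ih j h
        push_cast at this ⊢
        omega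
  | case4 part rest k h ih =>
      intro j hj
      rw [mi_other h] at hj
      have := ih j hj
      push_cast at this ⊢
      omega

theorem pass1_eq (n : Nat) (l : List String) (k : Nat) :
    ∀ (m : List Int), (∀ j ∈ m, j < (k : Int)) → k + l.length = n →
    (PySem.List.enumerate l (k : Int)).foldl
      (fun (m : PySem.Set Int) (p : Int × String) =>
        if p.2 = "--upstream-auth" ∧ PySem.Set.contains m p.1 = false ∧ p.1 + 1 < (n : Int)
        then PySem.Set.add m (p.1 + 1) else m) m
    = m ++ pvMI l k := by
  induction l, k using pvMI.induct with
  | case1 k => intro m hm hn; simp [pvMI, PySem.List.enumerate]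
  | case2 k =>
      intro m hm hn
      simp only [PySem.List.enumerate_cons, List.foldl_cons, true_and]
      rw [if_neg (show ¬(PySem.Set.contains m (k : Int) = false ∧ (k : Int) + 1 < (n : Int)) from by
          rintro ⟨-, hlt⟩
          simp only [List.length_cons, List.length_nil] at hn
          omega)]
      simp [mi_flag_nil, PySem.List.enumerate]
  | case3 k next rest' ih =>
      intro m hm hn
      simp only [List.length_cons] at hn
      have hcontains : PySem.Set.contains m (k : Int) = false := by
        simp only [PySem.Set.contains, List.contains_eq_mem, decide_eq_false_iff_not]
        intro h
        have := hm _ h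
        omega
      simp only [PySem.List.enumerate_cons, List.foldl_cons, true_and]
      rw [if_pos (show PySem.Set.contains m (k : Int) = false ∧ (k : Int) + 1 < (n : Int) from
          ⟨hcontains, by omega⟩)]
      have hadd : PySem.Set.add m ((k : Int) + 1) = m ++ [((k : Int) + 1)] := by
        simp only [PySem.Set.add, PySem.Set.contains, List.contains_eq_mem]
        rw [if_neg]
        simp only [decide_eq_true_eq]
        intro h
        have := hm _ h
        omega
      rw [hadd]
      rw [if_neg (show ¬(next = "--upstream-auth" ∧
            PySem.Set.contains (m ++ [((k : Int) + 1)]) ((k : Int) + 1) = false ∧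
            (k : Int) + 1 + 1 < (n : Int)) from by
          rintro ⟨-, hc, -⟩
          simp [PySem.Set.contains, List.contains_eq_mem] at hc)]
      have hc2 : ((k : Int) + 1 + 1) = ((k + 2 : Nat) : Int) := by push_cast; ring
      rw [hc2, ih (m ++ [((k : Int) + 1)]) ?_ ?_]
      · rw [mi_flag_cons]
        have e : ((k : Int) + 1) = ((k + 1 : Nat) : Int) := by push_cast; ring
        rw [e]
        simp
      · intro j hj
        rcases List.mem_append.mp hj with h | h
        · have := hm _ h; push_cast; omega
        · simp at h; push_cast; omega
      · omega
  | case4 part rest k h ih =>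
      intro m hm hn
      simp only [List.length_cons] at hn
      simp only [PySem.List.enumerate_cons, List.foldl_cons]
      rw [if_neg (show ¬(part = "--upstream-auth" ∧
            PySem.Set.contains m (k : Int) = false ∧ (k : Int) + 1 < (n : Int)) from by
          rintro ⟨h', -, -⟩; exact h h')]
      have hc : ((k : Int) + 1) = ((k + 1 : Nat) : Int) := by push_cast; ring
      rw [hc, ih m ?_ ?_]
      · rw [mi_other h]
      · intro j hj; have := hm _ hj; push_cast; omega
      · omega

theorem pass2_eq (M : List Int) (l : List String) :
    ∀ (k : Nat) (acc : List String),
    (∀ j : Int, (k : Int) ≤ j → (PySem.Set.contains M j = true ↔ j ∈ pvMI l k)) →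
    (PySem.List.enumerate l (k : Int)).foldl
      (fun (acc : List String) (p : Int × String) =>
        acc ++ [if PySem.Set.contains M p.1 = true then "******"
                else if p.2 = "--upstream-auth" then p.2 else pvMaskB p.2]) acc
    = acc ++ pvChunks l := by
  induction l using pvChunks.induct with
  | case1 => intro k acc hM; simp [pvChunks, PySem.List.enumerate]
  | case2 =>
      intro k acc hM
      have hck : ¬(PySem.Set.contains M (k : Int) = true) := by
        intro htrue
        have h2 := (hM (k : Int) le_rfl).mp htrue
        rw [mi_flag_nil] at h2
        exact List.not_mem_nil h2
      simp only [PySem.List.enumerate_cons, List.foldl_cons]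
      rw [if_neg hck]
      simp only [reduceIte]
      simp [chunks_flag_nil, PySem.List.enumerate]
  | case3 next rest' ih =>
      intro k acc hM
      have hck : ¬(PySem.Set.contains M (k : Int) = true) := by
        intro htrue
        have h2 := (hM (k : Int) le_rfl).mp htrue
        rw [mi_flag_cons, List.mem_cons] at h2
        rcases h2 with h | h
        · push_cast at h; omega
        · have := mi_gt rest' (k+2) _ h; push_cast at this; omega
      have hck1 : PySem.Set.contains M ((k : Int) + 1) = true := by
        refine (hM ((k : Int) + 1) (by omega)).mpr ?_
        rw [mi_flag_cons, List.mem_cons]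
        left
        push_cast
        ring
      simp only [PySem.List.enumerate_cons, List.foldl_cons]
      rw [if_neg hck]
      simp only [reduceIte]
      rw [if_pos hck1]
      have hc2 : ((k : Int) + 1 + 1) = ((k + 2 : Nat) : Int) := by push_cast; ring
      rw [hc2, ih (k+2) _ ?_]
      · rw [chunks_flag_cons]
        simp
      · intro j hj
        rw [hM j (by push_cast at hj ⊢; omega)]
        rw [mi_flag_cons, List.mem_cons]
        constructor
        · rintro (h | h)
          · exfalso; push_cast at h hj; omega
          · exact h
        · intro h; exact Or.inr h
  | case4 part rest h ih =>
      intro k acc hM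
      have hck : ¬(PySem.Set.contains M (k : Int) = true) := by
        intro htrue
        have h2 := (hM (k : Int) le_rfl).mp htrue
        rw [mi_other h] at h2
        have := mi_gt rest (k+1) _ h2
        push_cast at this
        omega
      simp only [PySem.List.enumerate_cons, List.foldl_cons]
      rw [if_neg hck, if_neg h]
      have hc1 : ((k : Int) + 1) = ((k + 1 : Nat) : Int) := by push_cast; ring
      rw [hc1, ih (k+1) _ ?_]
      · rw [chunks_other h]
        simp
      · intro j hj
        rw [hM j (by push_cast at hj ⊢; omega)]
        rw [mi_other h]

-- ===== VERDICT (by name: the statement is the Claim_ definition above) =====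
theorem mask_upstream_auth_in_cmd_spec : Claim_equal_mask_upstream_auth_in_cmd := by
  intro cmd_list _
  show mask_upstream_auth_in_cmd cmd_list = mask_upstream_auth_in_cmd_alt cmd_list
  simp only [mask_upstream_auth_in_cmd, mask_upstream_auth_in_cmd_alt]
  have hmask : (PySem.List.enumerate cmd_list).foldl
      (fun (m : PySem.Set Int) (p : Int × String) =>
        if p.2 = "--upstream-auth" ∧ PySem.Set.contains m p.1 = false ∧ p.1 + 1 < ((cmd_list.length : Nat) : Int)
        then PySem.Set.add m (p.1 + 1) else m) PySem.Set.empty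
      = pvMI cmd_list 0 := by
    have := pass1_eq cmd_list.length cmd_list 0 [] (by simp) (by simp)
    simpa [PySem.Set.empty] using this
  rw [loopA_eq cmd_list [], hmask]
  have hout := pass2_eq (pvMI cmd_list 0) cmd_list 0 []
    (by
      intro j _
      simp [PySem.Set.contains, List.contains_eq_mem])
  rw [Nat.cast_zero] at hout
  rw [hout]
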